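-- pv_equiv track=rewrite | github.com/jwj2002/agents | obsidian-agent/obsidian_agent/extractor.py | extract_captures
-- ===== SOURCE A (Python) =====
-- def extract_captures(conversation_text: str) -> list[str]:
--     """Extract [CAPTURE] tagged content from conversation."""
--     captures = []
--
--     lines = conversation_text.split("\n")
--     i = 0
--     while i < len(lines):
--         line = lines[i]
--
--         is_user_capture = line.startswith("User: [CAPTURE]")
--         is_assistant_capture = line.startswith("Assistant: [CAPTURE]")
--
--         if is_user_capture or is_assistant_capture:
--             if is_user_capture:
--                 content = line[len("User: [CAPTURE]"):].strip()
--             else: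
--                 content = line[len("Assistant: [CAPTURE]"):].strip()
--
--             # Collect multiline content until next speaker or empty line
--             i += 1
--             while i < len(lines):
--                 next_line = lines[i]
--                 if next_line.startswith("User:") or next_line.startswith("Assistant:"):
--                     break
--                 if next_line.startswith("A:"):
--                     break
--                 if not next_line.strip():
--                     if i + 1 >= len(lines) or lines[i + 1].startswith(("User:", "Assistant:", "A:", "[")):
--                         break
--                 content += "\n" + next_line
--                 i += 1
--
--             content = content.strip()
--             if content and len(content) > 10:
--                 captures.append(content)
--         else:
--             i += 1
--
--     return captures
-- ===== SOURCE B (Python) =====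
-- def extract_captures(conversation_text: str) -> list[str]:
--     """Extract [CAPTURE] tagged content from conversation (single flat pass)."""
--     captures = []
--     lines = conversation_text.split("\n")
--     n = len(lines)
--     current = None
--     for idx in range(n):
--         line = lines[idx]
--         if current is not None:
--             if (line.startswith("User:") or line.startswith("Assistant:")
--                     or line.startswith("A:")
--                     or (not line.strip()
--                         and (idx + 1 >= n
--                              or lines[idx + 1].startswith(("User:", "Assistant:", "A:", "["))))):
--                 c = current.strip()
--                 if len(c) > 10:
--                     captures.append(c)
--                 current = None
--             else:
--                 current += "\n" + line
--                 continue
--         if line.startswith("User: [CAPTURE]"):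
--             current = line[len("User: [CAPTURE]"):].strip()
--         elif line.startswith("Assistant: [CAPTURE]"):
--             current = line[len("Assistant: [CAPTURE]"):].strip()
--     if current is not None:
--         c = current.strip()
--         if len(c) > 10:
--             captures.append(c)
--     return captures
-- ===== Notes on version B (the rewrite author's own statement) =====
-- stated objective: simpler
-- what changed: Replaced A's nested index-driven while loops (inner loop consuming continuation lines, outer loop re-examining the break line) by a single flat pass over the lines with an Option state `current` that is flushed on a break and restarted on the same line.
import Mathlib
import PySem

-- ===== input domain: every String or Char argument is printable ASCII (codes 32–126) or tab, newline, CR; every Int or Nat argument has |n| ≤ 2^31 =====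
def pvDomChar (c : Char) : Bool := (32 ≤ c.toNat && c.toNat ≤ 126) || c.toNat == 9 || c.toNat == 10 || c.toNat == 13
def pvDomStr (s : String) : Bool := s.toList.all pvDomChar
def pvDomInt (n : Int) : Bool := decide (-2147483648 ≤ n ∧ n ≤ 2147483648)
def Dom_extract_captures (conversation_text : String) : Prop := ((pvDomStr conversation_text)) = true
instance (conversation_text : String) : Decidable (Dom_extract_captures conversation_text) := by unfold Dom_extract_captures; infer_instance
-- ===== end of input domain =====

-- B replaces A's nested index-driven while loops by a single flat pass over the lines
-- with an Option state `current` (objective: simpler decomposition, same cost).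

-- ===== PORT A =====
-- helper for A's blank-line lookahead: `i + 1 >= len(lines) or lines[i+1].startswith(("User:", "Assistant:", "A:", "["))`
def aBlankNext (rs : List (List Char)) : Bool :=
  match rs with
  | [] => true
  | r :: _ =>
    PySem.Chars.startswith r "User:".toList || PySem.Chars.startswith r "Assistant:".toList ||
    PySem.Chars.startswith r "A:".toList || PySem.Chars.startswith r "[".toList

-- A's inner `while` loop: consumes lines into `content` until a break; returns (content, unconsumed rest)
def aCollect (content : List Char) (rest : List (List Char)) : List Char × List (List Char) :=
  match rest with
  | [] => (content, [])
  | next :: rs =>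
    if PySem.Chars.startswith next "User:".toList || PySem.Chars.startswith next "Assistant:".toList then
      (content, next :: rs)
    else if PySem.Chars.startswith next "A:".toList then
      (content, next :: rs)
    else if PySem.Chars.strip next == [] then
      if aBlankNext rs then (content, next :: rs)
      else aCollect (content ++ '\n' :: next) rs
    else aCollect (content ++ '\n' :: next) rs

theorem aCollect_snd_le (content : List Char) (rest : List (List Char)) :
    (aCollect content rest).2.length ≤ rest.length := by
  induction rest generalizing content with
  | nil => simp [aCollect]
  | cons next rs ih =>
    simp only [aCollect]
    split_ifs <;> simp <;> exact Nat.le_succ_of_le (ih _)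

-- A's outer `while i < len(lines)` loop
def aLoop (ls : List (List Char)) : List String :=
  match ls with
  | [] => []
  | line :: rest =>
    let isU := PySem.Chars.startswith line "User: [CAPTURE]".toList
    let isA := PySem.Chars.startswith line "Assistant: [CAPTURE]".toList
    if isU || isA then
      let content0 :=
        if isU then PySem.Chars.strip (PySem.List.slice line (some 15) none)
        else PySem.Chars.strip (PySem.List.slice line (some 20) none)
      let p := aCollect content0 rest
      let c := PySem.Chars.strip p.1
      (if c ≠ [] ∧ 10 < c.length then [String.ofList c] else []) ++ aLoop p.2
    else aLoop rest
termination_by ls.length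
decreasing_by
  · exact Nat.lt_succ_of_le (aCollect_snd_le _ _)
  · simp

def extract_captures (conversation_text : String) : List String :=
  aLoop (PySem.Chars.splitOn conversation_text.toList "\n".toList)

-- ===== PORT B =====
-- start test: `User: [CAPTURE]` / `Assistant: [CAPTURE]` → initial content, else no capture
def bStart (line : List Char) : Option (List Char) :=
  if PySem.Chars.startswith line "User: [CAPTURE]".toList then
    some (PySem.Chars.strip (PySem.List.slice line (some 15) none))
  else if PySem.Chars.startswith line "Assistant: [CAPTURE]".toList then
    some (PySem.Chars.strip (PySem.List.slice line (some 20) none))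
  else none

-- B's break condition while inside a capture (rs = the lines after `line`, for the lookahead)
def bBreak (line : List Char) (rs : List (List Char)) : Bool :=
  PySem.Chars.startswith line "User:".toList || PySem.Chars.startswith line "Assistant:".toList ||
  PySem.Chars.startswith line "A:".toList ||
  (PySem.Chars.strip line == [] &&
    (match rs with
     | [] => true
     | r :: _ =>
       PySem.Chars.startswith r "User:".toList || PySem.Chars.startswith r "Assistant:".toList ||
       PySem.Chars.startswith r "A:".toList || PySem.Chars.startswith r "[".toList))

-- finalize a pending capture: strip, keep if len > 10
def bFlush (acc : List String) (cur : List Char) : List String :=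
  let c := PySem.Chars.strip cur
  if 10 < c.length then acc ++ [String.ofList c] else acc

-- B's single flat loop with state (current, captures)
def bLoop (ls : List (List Char)) (current : Option (List Char)) (acc : List String) : List String :=
  match ls, current with
  | [], some cur => bFlush acc cur
  | [], none => acc
  | line :: rs, some cur =>
    if bBreak line rs then bLoop rs (bStart line) (bFlush acc cur)
    else bLoop rs (some (cur ++ '\n' :: line)) acc
  | line :: rs, none => bLoop rs (bStart line) acc

def extract_captures_alt (conversation_text : String) : List String :=
  bLoop (PySem.Chars.splitOn conversation_text.toList "\n".toList) none []

-- ===== PRECONDITION & SPEC =====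
def Spec_extract_captures (conversation_text : String) (out : List String) : Prop := out = extract_captures_alt conversation_text
instance (conversation_text : String) (out : List String) : Decidable (Spec_extract_captures conversation_text out) := by unfold Spec_extract_captures; infer_instance

-- ===== CLAIM (what is proved, stated in full; the proofs are below) =====
def Claim_equal_extract_captures : Prop := ∀ (conversation_text : String), Dom_extract_captures conversation_text → Spec_extract_captures conversation_text (extract_captures conversation_text)

-- ===== LEMMAS AND PROOFS =====

-- A's keep-test `content and len(content) > 10` equals B's `len(c) > 10` after strip
theorem finA_eq (c : List Char) :
    (if c ≠ [] ∧ 10 < c.length then [String.ofList c] else [])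
      = (if 10 < c.length then [String.ofList c] else []) := by
  split_ifs with h1 h2 h2
  · rfl
  · exact absurd h1.2 h2
  · exact absurd ⟨by rintro rfl; simp at h2, h2⟩ h1
  · rfl

theorem bBreak_eq (line : List Char) (rs : List (List Char)) :
    bBreak line rs =
      (PySem.Chars.startswith line "User:".toList || PySem.Chars.startswith line "Assistant:".toList ||
       PySem.Chars.startswith line "A:".toList ||
       (PySem.Chars.strip line == [] && aBlankNext rs)) := by
  cases rs <;> rfl

theorem aCollect_break (cur line : List Char) (rs : List (List Char))
    (h : bBreak line rs = true) : aCollect cur (line :: rs) = (cur, line :: rs) := by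
  rw [bBreak_eq] at h
  unfold aCollect
  split_ifs with h1 h2 h3 h4 <;> simp_all

theorem aCollect_step (cur line : List Char) (rs : List (List Char))
    (h : bBreak line rs = false) :
    aCollect cur (line :: rs) = aCollect (cur ++ '\n' :: line) rs := by
  rw [bBreak_eq] at h
  unfold aCollect
  split_ifs with h1 h2 h3 h4
  · simp_all
  · simp_all
  · simp_all
  · exact aCollect.eq_def _ rs
  · exact aCollect.eq_def _ rs

-- proof-side abbreviations for A's capture-start content and the keep-test
def content0 (line : List Char) : List Char :=
  if PySem.Chars.startswith line "User: [CAPTURE]".toList then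
    PySem.Chars.strip (PySem.List.slice line (some 15) none)
  else PySem.Chars.strip (PySem.List.slice line (some 20) none)

def fin (c : List Char) : List String :=
  if 10 < c.length then [String.ofList c] else []

theorem bStart_eq (line : List Char) :
    bStart line =
      (if (PySem.Chars.startswith line "User: [CAPTURE]".toList ||
           PySem.Chars.startswith line "Assistant: [CAPTURE]".toList) then some (content0 line)
       else none) := by
  unfold bStart content0
  split_ifs with h1 h2 h3 h4 <;> simp_all

theorem bFlush_eq (acc : List String) (cur : List Char) :
    bFlush acc cur = acc ++ fin (PySem.Chars.strip cur) := by
  simp only [bFlush, fin]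
  split_ifs <;> simp

theorem aLoop_cons (line : List Char) (rest : List (List Char)) :
    aLoop (line :: rest) =
      (if (PySem.Chars.startswith line "User: [CAPTURE]".toList ||
           PySem.Chars.startswith line "Assistant: [CAPTURE]".toList) then
        fin (PySem.Chars.strip (aCollect (content0 line) rest).1)
          ++ aLoop (aCollect (content0 line) rest).2
       else aLoop rest) := by
  rw [aLoop]
  simp only [content0, fin, finA_eq]

-- the central invariant: one flat B-pass computes A's nested loops, for both states
theorem key (n : Nat) : ∀ (ls : List (List Char)), ls.length ≤ n →
    (∀ acc, bLoop ls none acc = acc ++ aLoop ls) ∧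
    (∀ cur acc, bLoop ls (some cur) acc
        = acc ++ fin (PySem.Chars.strip (aCollect cur ls).1) ++ aLoop (aCollect cur ls).2) := by
  induction n with
  | zero =>
    intro ls hls
    have hnil : ls = [] := List.length_eq_zero_iff.mp (Nat.le_zero.mp hls)
    subst hnil
    refine ⟨fun acc => by simp [bLoop, aLoop], fun cur acc => ?_⟩
    simp [bLoop, aLoop, aCollect, bFlush_eq]
  | succ m ih =>
    intro ls hls
    cases ls with
    | nil =>
      refine ⟨fun acc => by simp [bLoop, aLoop], fun cur acc => ?_⟩
      simp [bLoop, aLoop, aCollect, bFlush_eq]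
    | cons line rest =>
      have hr : rest.length ≤ m := Nat.lt_succ_iff.mp (Nat.lt_of_lt_of_le (by simp) hls)
      have P2 : ∀ acc, bLoop (line :: rest) none acc = acc ++ aLoop (line :: rest) := by
        intro acc
        show bLoop rest (bStart line) acc = _
        rw [aLoop_cons, bStart_eq]
        by_cases hc : (PySem.Chars.startswith line "User: [CAPTURE]".toList ||
            PySem.Chars.startswith line "Assistant: [CAPTURE]".toList) = true
        · rw [if_pos hc, if_pos hc, (ih rest hr).2 (content0 line) acc, List.append_assoc]
        · rw [if_neg hc, if_neg hc, (ih rest hr).1 acc]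
      refine ⟨P2, fun cur acc => ?_⟩
      by_cases hb : bBreak line rest = true
      · rw [show bLoop (line :: rest) (some cur) acc
              = bLoop rest (bStart line) (bFlush acc cur) by simp [bLoop, hb]]
        rw [show bLoop rest (bStart line) (bFlush acc cur)
              = bLoop (line :: rest) none (bFlush acc cur) from rfl]
        rw [P2, aCollect_break cur line rest hb, bFlush_eq]
      · rw [show bLoop (line :: rest) (some cur) acc
              = bLoop rest (some (cur ++ '\n' :: line)) acc by simp [bLoop, hb],
            (ih rest hr).2 (cur ++ '\n' :: line) acc,
            aCollect_step cur line rest (by simpa using hb)]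

-- ===== VERDICT (by name: the statement is the Claim_ definition above) =====
theorem extract_captures_spec : Claim_equal_extract_captures := by
  intro s _
  show extract_captures s = extract_captures_alt s
  unfold extract_captures extract_captures_alt
  rw [(key _ _ (le_refl _)).1 []]
  simp
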